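-- pv_equiv track=rewrite | github.com/SaiyedMuhammadAnasMaududi/PhysicalAi_HumanoidRobotics_TEXTBOOK | backend/src/services/citation_service.py | generate_provenance_statement
-- ===== SOURCE A (Python) =====
-- from typing import List, Dict, Any
--
-- def generate_provenance_statement(
--     citations: List[Dict[str, Any]],
--     query_text: str = None
-- ) -> str:
--     """
--     Generate a provenance statement for the response
--     """
--     if not citations:
--         return "No specific sources cited for this response."
--
--     if len(citations) == 1:
--         citation = citations[0]
--         return f"Based on content from {citation['chapter']}, {citation['section']}"
--     else:
--         # Get unique chapters
--         chapters = set()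
--         sections_by_chapter = {}
--
--         for citation in citations:
--             chapter = citation['chapter']
--             section = citation['section']
--             chapters.add(chapter)
--
--             if chapter not in sections_by_chapter:
--                 sections_by_chapter[chapter] = []
--             sections_by_chapter[chapter].append(section)
--
--         # Format the statement
--         parts = []
--         for chapter in sorted(chapters):
--             sections = sorted(sections_by_chapter[chapter])
--             if len(sections) == 1:
--                 parts.append(f"{chapter} {sections[0]}")
--             else:
--                 parts.append(f"{chapter} ({', '.join(sections)})")
--
--         return f"Based on content from {', '.join(parts)}"
-- ===== SOURCE B (Python) =====
-- # Different algorithm: instead of building a set of chapters plus a dict of section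
-- # lists and sorting each group afterwards, sort all citations once by
-- # (chapter, section) and emit the groups in a single linear scan.
-- def generate_provenance_statement(citations, query_text=None):
--     if not citations:
--         return "No specific sources cited for this response."
--
--     if len(citations) == 1:
--         c = citations[0]
--         return f"Based on content from {c['chapter']}, {c['section']}"
--
--     ordered = sorted(citations, key=lambda c: (c['chapter'], c['section']))
--     parts = []
--     i, n = 0, len(ordered)
--     while i < n:
--         chapter = ordered[i]['chapter']
--         sections = []
--         while i < n and ordered[i]['chapter'] == chapter:
--             sections.append(ordered[i]['section'])
--             i += 1
--         if len(sections) == 1: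
--             parts.append(f"{chapter} {sections[0]}")
--         else:
--             parts.append(f"{chapter} ({', '.join(sections)})")
--
--     return f"Based on content from {', '.join(parts)}"
-- ===== Notes on version B (the rewrite author's own statement) =====
-- stated objective: alternative
-- what changed: Replaces A's chapter set + dict of section lists with per-group sorting by a single global sort of the citations by (chapter, section) followed by one linear grouping scan that emits the parts directly.
import Mathlib
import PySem

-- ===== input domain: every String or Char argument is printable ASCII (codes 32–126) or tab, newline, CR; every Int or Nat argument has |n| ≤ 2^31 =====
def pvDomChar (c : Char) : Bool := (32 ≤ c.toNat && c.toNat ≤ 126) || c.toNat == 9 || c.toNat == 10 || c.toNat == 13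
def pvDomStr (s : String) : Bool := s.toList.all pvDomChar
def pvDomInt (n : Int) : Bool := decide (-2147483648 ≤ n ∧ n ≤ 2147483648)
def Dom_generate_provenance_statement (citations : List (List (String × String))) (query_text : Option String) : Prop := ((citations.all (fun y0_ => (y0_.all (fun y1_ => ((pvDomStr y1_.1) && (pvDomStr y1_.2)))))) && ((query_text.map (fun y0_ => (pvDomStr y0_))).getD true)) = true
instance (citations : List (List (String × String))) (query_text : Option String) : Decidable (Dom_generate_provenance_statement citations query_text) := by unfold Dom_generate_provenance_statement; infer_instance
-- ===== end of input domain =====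

-- B sorts all citations once by (chapter, section) and emits the grouped parts in one
-- linear scan, instead of A's chapter set + dict of per-chapter section lists sorted
-- per group afterwards (objective: alternative; same asymptotic cost).

-- ===== PORT A =====
-- citation['chapter'] / citation['section'] (Pre_ guarantees the key is present)
def chapOf (c : List (String × String)) : String := (PySem.Dict.mk c).getD "chapter" ""
def secOf (c : List (String × String)) : String := (PySem.Dict.mk c).getD "section" ""

def generate_provenance_statement (citations : List (List (String × String))) (query_text : Option String) : String :=
  if citations.isEmpty then "No specific sources cited for this response."
  else if citations.length == 1 then
    let citation := citations.headD []
    "Based on content from " ++ chapOf citation ++ ", " ++ secOf citation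
  else
    -- chapters = set(); sections_by_chapter = {}; for citation in citations: …
    let st := citations.foldl
      (fun (st : PySem.Set String × PySem.Dict String (List String)) c =>
        (PySem.Set.add st.1 (chapOf c),
         (if st.2.contains (chapOf c) then st.2 else st.2.insert (chapOf c) []).modify
           (chapOf c) [] (fun l => l ++ [secOf c])))
      (PySem.Set.empty, PySem.Dict.empty)
    -- parts = []; for chapter in sorted(chapters): …
    let parts := (PySem.List.sorted st.1 (fun x => x) false).foldl
      (fun parts ch =>
        let sections := PySem.List.sorted (st.2.getD ch []) (fun x => x) false
        if sections.length == 1 then parts ++ [ch ++ " " ++ sections.headD ""]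
        else parts ++ [ch ++ " (" ++ PySem.Str.join ", " sections ++ ")"])
      []
    "Based on content from " ++ PySem.Str.join ", " parts

-- ===== PORT B =====
-- the outer while loop of Source B: one part per run of equal chapters in the sorted list
-- (the inner while = takeWhile / dropWhile on the remaining citations)
def partsOf : List (List (String × String)) → List String
  | [] => []
  | c :: rest =>
    let ch := chapOf c
    let sections := secOf c :: (rest.takeWhile (fun c' => chapOf c' == ch)).map secOf
    (if sections.length == 1 then ch ++ " " ++ sections.headD ""
     else ch ++ " (" ++ PySem.Str.join ", " sections ++ ")")
      :: partsOf (rest.dropWhile (fun c' => chapOf c' == ch))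
termination_by l => l.length
decreasing_by
  have := List.length_dropWhile_le (fun c' => chapOf c' == chapOf c) rest
  simp; omega

def generate_provenance_statement_alt (citations : List (List (String × String))) (query_text : Option String) : String :=
  if citations.isEmpty then "No specific sources cited for this response."
  else if citations.length == 1 then
    let c := citations.headD []
    "Based on content from " ++ chapOf c ++ ", " ++ secOf c
  else
    let ordered := PySem.List.sorted2 citations chapOf secOf false
    "Based on content from " ++ PySem.Str.join ", " (partsOf ordered)

-- ===== PRECONDITION & SPEC =====
-- Pre_ excludes exactly the citations on which the Python A raises KeyError: a citation
-- dict without a 'chapter' or a 'section' key.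
def Pre_generate_provenance_statement (citations : List (List (String × String))) (query_text : Option String) : Prop :=
  ∀ c ∈ citations, (PySem.Dict.mk c).contains "chapter" = true ∧ (PySem.Dict.mk c).contains "section" = true

instance (citations : List (List (String × String))) (query_text : Option String) : Decidable (Pre_generate_provenance_statement citations query_text) := by unfold Pre_generate_provenance_statement; infer_instance

def pvWitness_generate_provenance_statement : (List (List (String × String))) × Option String :=
  ([[("chapter", "Chapter 1"), ("section", "1.2")], [("chapter", "Chapter 1"), ("section", "1.1")]], some "hi")

def Spec_generate_provenance_statement (citations : List (List (String × String))) (query_text : Option String) (out : String) : Prop := out = generate_provenance_statement_alt citations query_text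
instance (citations : List (List (String × String))) (query_text : Option String) (out : String) : Decidable (Spec_generate_provenance_statement citations query_text out) := by unfold Spec_generate_provenance_statement; infer_instance

-- ===== CLAIM (what is proved, stated in full; the proofs are below) =====
def Claim_equal_generate_provenance_statement : Prop := ∀ (citations : List (List (String × String))) (query_text : Option String), Dom_generate_provenance_statement citations query_text → Pre_generate_provenance_statement citations query_text → Spec_generate_provenance_statement citations query_text (generate_provenance_statement citations query_text)

-- ===== LEMMAS AND PROOFS =====

-- formatting of one part, shared by the proofs about both ports
def fmt (ch : String) (secs : List String) : String :=
  if secs.length == 1 then ch ++ " " ++ secs.headD ""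
  else ch ++ " (" ++ PySem.Str.join ", " secs ++ ")"

-- the lexicographic sort key underlying B's sorted2
def lkey (c : List (String × String)) : Lex (String × String) := toLex (chapOf c, secOf c)

lemma sorted2_eq_sorted_lkey (xs : List (List (String × String))) :
    PySem.List.sorted2 xs chapOf secOf false = PySem.List.sorted xs lkey false := by
  unfold PySem.List.sorted2 PySem.List.sorted
  simp only [if_neg (by decide : ¬ (false = true))]
  congr 1
  funext acc x
  congr 1
  funext a b
  simp only [lkey, Prod.Lex.lt_iff]
  rcases lt_trichotomy (chapOf a) (chapOf b) with h | h | h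
  · simp [h]
  · simp [h]
  · simp [h, not_lt_of_gt h, ne_of_gt h]

lemma lkey_le_chap {a b : List (String × String)} (h : lkey a ≤ lkey b) : chapOf a ≤ chapOf b := by
  rcases Prod.Lex.le_iff.mp h with h' | ⟨h', _⟩
  · exact le_of_lt h'
  · exact le_of_eq h'

lemma lkey_le_sec {a b : List (String × String)} (ha : chapOf a = chapOf b)
    (h : lkey a ≤ lkey b) : secOf a ≤ secOf b := by
  rcases Prod.Lex.le_iff.mp h with h' | ⟨_, h'⟩
  · exact absurd h' (by simp [lkey, ha])
  · exact h'

lemma discard_of_not_mem {α : Type} [BEq α] [LawfulBEq α] {s : PySem.Set α} {a : α}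
    (h : a ∉ s) : PySem.Set.discard s a = s := by
  simp only [PySem.Set.discard]
  rw [List.filter_eq_self]
  intro x hx
  simp only [ne_eq, Bool.not_eq_eq_eq_not, Bool.not_true, beq_eq_false_iff_ne]
  exact fun hxa => h (hxa ▸ hx)

lemma ofList_discard_append {α : Type} [BEq α] [LawfulBEq α] (a : α) :
    ∀ (xs ys : List α), (∀ x ∈ xs, x = a) → a ∉ ys →
    PySem.Set.discard (PySem.Set.ofList (xs ++ ys)) a = PySem.Set.ofList ys
  | [], ys, _, hy => by simpa using discard_of_not_mem (by simpa [PySem.Set.mem_ofList] using hy)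
  | x :: xs, ys, hx, hy => by
    have hxa : x = a := hx x (by simp)
    subst hxa
    rw [List.cons_append, PySem.Set.ofList_cons]
    show PySem.Set.discard (x :: PySem.Set.discard (PySem.Set.ofList (xs ++ ys)) x) x = _
    simp only [PySem.Set.discard, List.filter_cons, beq_self_eq_true, Bool.not_true,
      List.filter_filter]
    simp only [Bool.and_self]
    exact ofList_discard_append x xs ys (fun y hy' => hx y (by simp [hy'])) hy

lemma ofList_sublist {α : Type} [BEq α] [LawfulBEq α] : ∀ (xs : List α), (PySem.Set.ofList xs).Sublist xs
  | [] => by simp [PySem.Set.ofList]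
  | x :: xs => by
    rw [PySem.Set.ofList_cons]
    refine List.Sublist.cons₂ x ?_
    exact ((List.filter_sublist).trans (ofList_sublist xs))

lemma partsOf_char : ∀ (n : Nat) (l : List (List (String × String))), l.length ≤ n →
    l.Pairwise (fun a b => lkey a ≤ lkey b) →
    partsOf l = (PySem.Set.ofList (l.map chapOf)).map
      (fun ch => fmt ch ((l.filter (fun c => chapOf c == ch)).map secOf)) := by
  intro n
  induction n with
  | zero =>
    intro l hl _
    have : l = [] := List.eq_nil_of_length_eq_zero (Nat.le_zero.mp hl)
    subst this
    simp [partsOf, PySem.Set.ofList]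
  | succ n ih =>
    intro l hl hpw
    cases l with
    | nil => simp [partsOf, PySem.Set.ofList]
    | cons c rest =>
      have hpwr := List.pairwise_cons.mp hpw
      rw [partsOf]
      set same := rest.takeWhile (fun c' => chapOf c' == chapOf c) with hsame_def
      set after := rest.dropWhile (fun c' => chapOf c' == chapOf c) with hafter_def
      have hrest : same ++ after = rest := List.takeWhile_append_dropWhile
      have hsame : ∀ x ∈ same, chapOf x = chapOf c := by
        intro x hx
        rw [hsame_def] at hx
        exact eq_of_beq (List.mem_takeWhile_imp (p := fun c' => chapOf c' == chapOf c) hx)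
      have hcle : ∀ x ∈ rest, chapOf c ≤ chapOf x := fun x hx => lkey_le_chap (hpwr.1 x hx)
      have hafter : ∀ x ∈ after, chapOf c < chapOf x := by
        cases hfa : after with
        | nil => intro x hx; exact absurd hx (List.not_mem_nil)
        | cons h0 t0 =>
          have hh0 : (fun c' => chapOf c' == chapOf c) h0 = false := by
            have := List.head?_dropWhile_not (fun c' => chapOf c' == chapOf c) rest
            rw [← hafter_def, hfa] at this
            exact this
          have hh0ne : chapOf h0 ≠ chapOf c := by
            simp only [beq_eq_false_iff_ne, ne_eq] at hh0
            exact hh0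
          have hh0mem : h0 ∈ rest := (List.dropWhile_sublist _).mem
            (by rw [← hafter_def, hfa]; exact List.mem_cons_self ..)
          have hh0lt : chapOf c < chapOf h0 := lt_of_le_of_ne (hcle h0 hh0mem) (Ne.symm hh0ne)
          have hpwa : after.Pairwise (fun a b => chapOf a ≤ chapOf b) :=
            List.Pairwise.sublist
              (hafter_def ▸ (List.dropWhile_sublist _).trans (List.sublist_cons_self c rest))
              (hpw.imp (fun h => lkey_le_chap h))
          intro x hx
          rw [hfa] at hpwa
          rcases List.mem_cons.mp hx with rfl | hx
          · exact hh0lt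
          · exact lt_of_lt_of_le hh0lt ((List.pairwise_cons.mp hpwa).1 x hx)
      have hfs : List.filter (fun c' => chapOf c' == chapOf c) same = same := by
        rw [List.filter_eq_self]
        intro x hx
        simpa using hsame x hx
      have hfa0 : List.filter (fun c' => chapOf c' == chapOf c) after = [] := by
        rw [List.filter_eq_nil_iff]
        intro x hx
        simpa using ne_of_gt (hafter x hx)
      have hfilter_head : (c :: rest).filter (fun c' => chapOf c' == chapOf c) = c :: same := by
        rw [List.filter_cons, if_pos (by simp), ← hrest, List.filter_append, hfs, hfa0,
          List.append_nil]
      have hset : PySem.Set.ofList ((c :: rest).map chapOf)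
          = chapOf c :: PySem.Set.ofList (after.map chapOf) := by
        rw [List.map_cons, PySem.Set.ofList_cons, ← hrest, List.map_append]
        rw [ofList_discard_append (chapOf c) (same.map chapOf) (after.map chapOf)
          (by intro x hx; rcases List.mem_map.mp hx with ⟨y, hy, rfl⟩; exact hsame y hy)
          (by intro hx; rcases List.mem_map.mp hx with ⟨y, hy, he⟩
              exact absurd he (ne_of_gt (hafter y hy)))]
      have hlen_after : after.length ≤ n := by
        have h1 := List.length_dropWhile_le (fun c' => chapOf c' == chapOf c) rest
        rw [← hafter_def] at h1
        simp at hl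
        omega
      have hpw_after : after.Pairwise (fun a b => lkey a ≤ lkey b) :=
        List.Pairwise.sublist
          (hafter_def ▸ (List.dropWhile_sublist _).trans (List.sublist_cons_self c rest)) hpw
      have hIH := ih after hlen_after hpw_after
      rw [hset, List.map_cons]
      congr 1
      · show _ = fmt (chapOf c) (((c :: rest).filter (fun c' => chapOf c' == chapOf c)).map secOf)
        rw [hfilter_head]
        simp [fmt]
      · rw [hIH]
        apply List.map_congr_left
        intro ch hch
        have hch' : chapOf c < ch := by
          rcases List.mem_map.mp ((PySem.Set.mem_ofList _ _).mp hch) with ⟨y, hy, rfl⟩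
          exact hafter y hy
        have hfs' : List.filter (fun c' => chapOf c' == ch) same = [] := by
          rw [List.filter_eq_nil_iff]
          intro x hx
          simp [hsame x hx]
          exact ne_of_lt hch'
        have hfe : List.filter (fun c' => chapOf c' == ch) (c :: rest)
            = List.filter (fun c' => chapOf c' == ch) after := by
          rw [List.filter_cons, if_neg (by simp [ne_of_lt hch']), ← hrest, List.filter_append,
            hfs', List.nil_append]
        rw [hfe]

lemma dict_step (d : PySem.Dict String (List String)) (c : List (String × String)) :
    (if d.contains (chapOf c) then d else d.insert (chapOf c) []).modify (chapOf c) []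
      (fun l => l ++ [secOf c])
    = d.modify (chapOf c) [] (fun l => l ++ [secOf c]) := by
  by_cases h : d.contains (chapOf c) = true
  · rw [if_pos h]
  · rw [if_neg h]
    simp only [PySem.Dict.modify]
    rw [PySem.Dict.getD_insert_self, PySem.Dict.insert_insert_self,
        PySem.Dict.getD_of_not_contains d [] (by simpa using h)]

lemma grpDict (citations : List (List (String × String))) (ch : String) :
    (citations.foldl (fun d c =>
        (if d.contains (chapOf c) then d else d.insert (chapOf c) []).modify (chapOf c) []
          (fun l => l ++ [secOf c])) PySem.Dict.empty).getD ch []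
    = (citations.filter (fun c => chapOf c == ch)).map secOf := by
  rw [PySem.List.foldl_congr_mem _ _ (fun d c => d.modify (chapOf c) [] (fun l => l ++ [secOf c])) _
    (fun acc x _ => dict_step acc x)]
  rw [show citations.foldl (fun d c => d.modify (chapOf c) [] (fun l => l ++ [secOf c])) PySem.Dict.empty
      = (citations.map (fun c => (chapOf c, secOf c))).foldl
          (fun d p => d.modify p.1 [] (fun l => l ++ [p.2])) PySem.Dict.empty from
    (List.foldl_map (f := fun c => (chapOf c, secOf c))
      (g := fun (d : PySem.Dict String (List String)) (p : String × String) =>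
        d.modify p.1 ([] : List String) (fun l => l ++ [p.2]))).symm]
  rw [PySem.Dict.getD_foldl_modify_append]
  simp only [PySem.Dict.getD_empty, List.nil_append, List.filter_map, List.map_map]
  rfl

lemma chaptersSet (citations : List (List (String × String))) :
    citations.foldl (fun s c => PySem.Set.add s (chapOf c)) PySem.Set.empty
    = PySem.Set.ofList (citations.map chapOf) := by
  rw [PySem.Set.ofList_eq_foldl, List.foldl_map]
  rfl

lemma main_eq (citations : List (List (String × String))) (q : Option String) :
    generate_provenance_statement citations q = generate_provenance_statement_alt citations q := by
  unfold generate_provenance_statement generate_provenance_statement_alt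
  split_ifs with h1 h2
  · rfl
  · rfl
  · rw [sorted2_eq_sorted_lkey]
    dsimp only
    congr 1
    have hperm := PySem.List.sorted_perm citations lkey false
    have hpair := PySem.List.sorted_pairwise citations lkey
    rw [partsOf_char (PySem.List.sorted citations lkey false).length _ le_rfl hpair]
    have hsplit : List.foldl
        (fun (st : PySem.Set String × PySem.Dict String (List String)) c =>
          (PySem.Set.add st.1 (chapOf c),
           (if st.2.contains (chapOf c) then st.2 else st.2.insert (chapOf c) []).modify
             (chapOf c) [] (fun l => l ++ [secOf c])))
        (PySem.Set.empty, PySem.Dict.empty) citations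
        = (citations.foldl (fun s c => PySem.Set.add s (chapOf c)) PySem.Set.empty,
           citations.foldl (fun d c =>
             (if d.contains (chapOf c) then d else d.insert (chapOf c) []).modify
               (chapOf c) [] (fun l => l ++ [secOf c])) PySem.Dict.empty) :=
      PySem.List.foldl_prod_mk (fun s c => PySem.Set.add s (chapOf c))
        (fun d c => (if d.contains (chapOf c) then d else d.insert (chapOf c) []).modify
          (chapOf c) [] (fun l => l ++ [secOf c])) citations PySem.Set.empty PySem.Dict.empty
    rw [hsplit]
    dsimp only
    rw [chaptersSet]
    rw [PySem.List.foldl_congr_mem _ _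
      (fun parts ch => parts ++ [fmt ch (PySem.List.sorted
        ((citations.filter (fun c => chapOf c == ch)).map secOf) (fun x => x) false)]) _
      (by
        intro acc x _
        rw [grpDict]
        simp only [fmt]
        split <;> rfl)]
    rw [PySem.List.foldl_append_singleton_eq_map, List.nil_append]
    have hch : PySem.List.sorted (PySem.Set.ofList (citations.map chapOf)) (fun x => x) false
        = PySem.Set.ofList ((PySem.List.sorted citations lkey false).map chapOf) := by
      apply PySem.List.sorted_id_eq_of_perm_of_pairwise
      · exact (List.perm_ext_iff_of_nodup (PySem.Set.nodup_ofList _) (PySem.Set.nodup_ofList _)).mpr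
          (fun a => by
            simp only [PySem.Set.mem_ofList]
            exact (hperm.map chapOf).mem_iff)
      · exact List.Pairwise.sublist (ofList_sublist _)
          (List.pairwise_map.mpr (hpair.imp (fun h => lkey_le_chap h)))
    rw [hch]
    congr 1
    apply List.map_congr_left
    intro ch hch'
    congr 1
    apply PySem.List.sorted_id_eq_of_perm_of_pairwise
    · exact (hperm.filter _).map secOf
    · refine List.pairwise_map.mpr ?_
      refine List.Pairwise.imp_of_mem ?_ (List.Pairwise.sublist (List.filter_sublist) hpair)
      intro a b ha hb hab
      exact lkey_le_sec (by
        have ha' := eq_of_beq (List.of_mem_filter (p := fun c => chapOf c == ch) ha)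
        have hb' := eq_of_beq (List.of_mem_filter (p := fun c => chapOf c == ch) hb)
        rw [ha', hb']) hab

-- ===== VERDICT (by name: the statement is the Claim_ definition above) =====
theorem generate_provenance_statement_spec : Claim_equal_generate_provenance_statement := by
  intro citations query_text _ _
  exact main_eq citations query_text
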